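-- pv_equiv track=rewrite | github.com/alanhakhyeonsong/AlgorithmSolv | codes/Programmers/Lv1/신고결과받기.py | solution
-- ===== SOURCE A (Python) =====
-- from collections import defaultdict
--
-- def solution(id_list, report, k):
--     answer = [0 for _ in range(len(id_list))]
--     banned_cnt = defaultdict(int)
--     report_dict = defaultdict(set)
--
--     for id in list(set(report)):
--         banned_cnt[id.split(" ")[1]] += 1
--         report_dict[id.split(" ")[0]].add(id.split(" ")[1])
--
--     for idx, x in enumerate(id_list):
--         for y in report_dict[x]:
--             if banned_cnt[y] >= 2:
--                 answer[idx] += 1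
--
--     return answer
-- ===== SOURCE B (Python) =====
-- from collections import Counter
--
-- def solution(id_list, report, k):
--     uniq = set(report)
--     tgt_cnt = Counter(r.split(" ")[1] for r in uniq)
--     pairs = {(r.split(" ")[0], r.split(" ")[1]) for r in uniq}
--     credit = Counter(who for who, tgt in pairs if tgt_cnt[tgt] >= 2)
--     return [credit[x] for x in id_list]
-- ===== Notes on version B (the rewrite author's own statement) =====
-- stated objective: alternative
-- what changed: Replaces A's two defaultdicts plus a per-id inner scan over each id's reported-target set with a flat pipeline: count distinct report strings per target, dedup (reporter,target) pairs, build a single credit Counter in one pass over the pairs, and map id_list through it.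
import Mathlib
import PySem

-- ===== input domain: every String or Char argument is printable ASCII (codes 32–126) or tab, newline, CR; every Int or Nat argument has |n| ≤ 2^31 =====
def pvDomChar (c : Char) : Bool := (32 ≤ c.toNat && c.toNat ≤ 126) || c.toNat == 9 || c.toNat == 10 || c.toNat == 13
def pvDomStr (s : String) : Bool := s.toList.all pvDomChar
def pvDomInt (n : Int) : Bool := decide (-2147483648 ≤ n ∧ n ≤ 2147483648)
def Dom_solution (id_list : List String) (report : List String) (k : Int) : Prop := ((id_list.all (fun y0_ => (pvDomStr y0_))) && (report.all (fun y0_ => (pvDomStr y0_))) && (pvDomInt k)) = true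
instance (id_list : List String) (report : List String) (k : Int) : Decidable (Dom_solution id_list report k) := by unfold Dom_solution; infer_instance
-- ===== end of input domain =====

-- B builds one credit Counter from deduplicated (reporter, target) pairs instead of A's
-- two defaultdicts with a per-id inner scan; the return values are proved equal on Pre_.

-- shared helpers: both Pythons read a report string with r.split(" ")[0] / r.split(" ")[1]
def srcOf (r : String) : String := PySem.List.pyGetD ((PySem.Str.split? r " ").getD []) 0 ""
def tgtOf (r : String) : String := PySem.List.pyGetD ((PySem.Str.split? r " ").getD []) 1 ""

-- ===== PORT A =====
def solution (id_list : List String) (report : List String) (k : Int) : List Int :=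
  let answer : List Int := (PySem.List.pyRange 0 id_list.length 1).map (fun _ => (0 : Int))
  let st :=
    (PySem.Set.ofList report).foldl
      (fun (st : PySem.Dict String Int × PySem.Dict String (PySem.Set String)) r =>
        (st.1.modify (tgtOf r) 0 (· + 1),
         st.2.modify (srcOf r) PySem.Set.empty (fun s => PySem.Set.add s (tgtOf r))))
      (PySem.Dict.empty, PySem.Dict.empty)
  (PySem.List.enumerate id_list 0).foldl
    (fun ans p =>
      (st.2.getD p.2 PySem.Set.empty).foldl
        (fun ans y =>
          if st.1.getD y 0 ≥ 2 then
            PySem.List.pySetD ans p.1 (PySem.List.pyGetD ans p.1 0 + 1)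
          else ans)
        ans)
    answer

-- ===== PORT B =====
def solution_alt (id_list : List String) (report : List String) (k : Int) : List Int :=
  let uniq := PySem.Set.ofList report
  let tgt_cnt : PySem.Dict String Int := PySem.Dict.counter (uniq.map tgtOf)
  let pairs : PySem.Set (String × String) := PySem.Set.ofList (uniq.map (fun r => (srcOf r, tgtOf r)))
  let credit : PySem.Dict String Int :=
    PySem.Dict.counter ((pairs.filter (fun p => tgt_cnt.getD p.2 0 ≥ 2)).map (·.1))
  id_list.map (fun x => credit.getD x 0)

-- ===== PRECONDITION & SPEC =====
-- Pre_ excludes report strings without a space, on which both Pythons raise IndexError at split(" ")[1]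
def Pre_solution (id_list : List String) (report : List String) (k : Int) : Prop :=
  ∀ r ∈ report, PySem.Str.isIn " " r = true
instance (id_list : List String) (report : List String) (k : Int) : Decidable (Pre_solution id_list report k) := by unfold Pre_solution; infer_instance

def pvWitness_solution : List String × List String × Int := (["muzi", "frodo"], ["muzi frodo", "apeach frodo"], 2)

def Spec_solution (id_list : List String) (report : List String) (k : Int) (out : List Int) : Prop := out = solution_alt id_list report k
instance (id_list : List String) (report : List String) (k : Int) (out : List Int) : Decidable (Spec_solution id_list report k out) := by unfold Spec_solution; infer_instance

-- ===== CLAIM (what is proved, stated in full; the proofs are below) =====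
def Claim_equal_solution : Prop := ∀ (id_list : List String) (report : List String) (k : Int), Dom_solution id_list report k → Pre_solution id_list report k → Spec_solution id_list report k (solution id_list report k)

-- ===== LEMMAS AND PROOFS =====

-- invariant: the grouping dict built by A equals, per key, the x-column of the pair set built by B
theorem group_inv (U : List String)
    (d : PySem.Dict String (PySem.Set String)) (s : PySem.Set (String × String))
    (hinv : ∀ x, d.getD x PySem.Set.empty = (s.filter (fun p => p.1 == x)).map (·.2)) (x : String) :
    (U.foldl (fun d r => d.modify (srcOf r) PySem.Set.empty (fun t => PySem.Set.add t (tgtOf r))) d).getD x PySem.Set.empty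
      = ((U.foldl (fun s r => PySem.Set.add s (srcOf r, tgtOf r)) s).filter (fun p => p.1 == x)).map (·.2) := by
  induction U generalizing d s with
  | nil => simpa using hinv x
  | cons r U ih =>
      simp only [List.foldl_cons]
      refine ih _ _ (fun x => ?_)
      by_cases hc : (srcOf r, tgtOf r) ∈ s
      · -- pair already present: both sides unchanged
        have htgt : tgtOf r ∈ (s.filter (fun p => p.1 == srcOf r)).map (·.2) := by
          simp only [List.mem_map, List.mem_filter, beq_iff_eq]
          exact ⟨(srcOf r, tgtOf r), ⟨hc, rfl⟩, rfl⟩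
        by_cases hx : x = srcOf r
        · subst hx
          rw [PySem.Dict.getD_modify_self, hinv]
          simp [PySem.Set.add, PySem.Set.contains, hc, htgt]
        · rw [PySem.Dict.getD_modify_of_ne _ _ _ hx, hinv]
          simp [PySem.Set.add, PySem.Set.contains, hc]
      · -- fresh pair: appended on both sides (to the x-column only for x = srcOf r)
        have htgt : tgtOf r ∉ (s.filter (fun p => p.1 == srcOf r)).map (·.2) := by
          intro hmem
          apply hc
          simp only [List.mem_map, List.mem_filter, beq_iff_eq] at hmem
          obtain ⟨p, ⟨hps, hp1⟩, hp2⟩ := hmem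
          have hp : p = (srcOf r, tgtOf r) := Prod.ext hp1 hp2
          rwa [← hp]
        by_cases hx : x = srcOf r
        · subst hx
          rw [PySem.Dict.getD_modify_self, hinv]
          simp [PySem.Set.add, PySem.Set.contains, hc, htgt, List.filter_append]
        · rw [PySem.Dict.getD_modify_of_ne _ _ _ hx, hinv]
          have hne : ((srcOf r, tgtOf r).1 == x) = false := by simp [Ne.symm hx]
          simp [PySem.Set.add, PySem.Set.contains, hc, List.filter_append, hne]

-- outer loop of A: each enumerate step adds, at its own index, the number of banned targets
theorem outer_fold (c : String → Prop) [DecidablePred c] (S : String → List String)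
    (xs : List String) (pre rest : List Int) (h : rest.length = xs.length) :
    (PySem.List.enumerate xs (pre.length : Int)).foldl
      (fun ans p =>
        (S p.2).foldl
          (fun ans y =>
            if c y then PySem.List.pySetD ans p.1 (PySem.List.pyGetD ans p.1 0 + 1) else ans)
          ans)
      (pre ++ rest)
      = pre ++ List.zipWith (fun a x => a + (((S x).countP (fun y => decide (c y)) : Nat) : Int)) rest xs := by
  induction xs generalizing pre rest with
  | nil =>
      have hr : rest = [] := by simpa using h
      subst hr
      simp [PySem.List.enumerate]
  | cons x xs ih =>
      obtain ⟨a, rest, rfl⟩ : ∃ a r, rest = a :: r := by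
        cases rest with
        | nil => simp at h
        | cons a r => exact ⟨a, r, rfl⟩
      rw [PySem.List.enumerate_cons, List.foldl_cons]
      have hlen : pre.length < (pre ++ a :: rest).length := by
        simp
      have hget : PySem.List.pyGetD (pre ++ a :: rest) (pre.length : Int) 0 = a := by
        rw [PySem.List.pyGetD_natCast, List.getD_eq_getElem _ _ hlen]
        simp
      have hinner : ∀ (ans : List Int) (n : Nat), n < ans.length → ∀ (s : List String),
          s.foldl (fun ans y => if c y then PySem.List.pySetD ans (n : Int) (PySem.List.pyGetD ans (n : Int) 0 + 1) else ans) ans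
            = PySem.List.pySetD ans (n : Int) (PySem.List.pyGetD ans (n : Int) 0 + ((s.countP (fun y => decide (c y)) : Nat) : Int)) := by
        intro ans n hn s
        induction s generalizing ans with
        | nil =>
            simp only [List.foldl_nil, List.countP_nil, Nat.cast_zero, add_zero]
            rw [PySem.List.pySetD_natCast, PySem.List.pyGetD_natCast,
              List.getD_eq_getElem _ _ hn, List.set_getElem_self]
        | cons y s ihs =>
            simp only [List.foldl_cons, List.countP_cons]
            by_cases hy : c y
            · have hn' : n < (PySem.List.pySetD ans (n : Int) (PySem.List.pyGetD ans (n : Int) 0 + 1)).length := by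
                rw [PySem.List.pySetD_natCast, List.length_set]; exact hn
              rw [if_pos hy, ihs _ hn']
              rw [PySem.List.pyGetD_pySetD_natCast _ _ _ _ _ hn, if_pos rfl]
              simp only [PySem.List.pySetD_natCast, List.set_set]
              have hd : (decide (c y)) = true := by simpa using hy
              rw [hd]
              congr 1
              simp only [if_true]
              push_cast
              ring
            · have hd : (decide (c y)) = false := by simpa using hy
              rw [if_neg hy, ihs _ hn, hd]
              simp
      rw [hinner _ pre.length hlen _, hget, PySem.List.pySetD_natCast]
      have hset : (pre ++ a :: rest).set pre.length (a + (((S x).countP (fun y => decide (c y)) : Nat) : Int))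
          = (pre ++ [a + (((S x).countP (fun y => decide (c y)) : Nat) : Int)]) ++ rest := by
        rw [List.set_append_right _ _ (Nat.le_refl _)]
        simp
      rw [hset]
      have hlen2 : ((pre.length : Int) + 1) = (((pre ++ [a + (((S x).countP (fun y => decide (c y)) : Nat) : Int)]).length : Nat) : Int) := by
        simp
      rw [hlen2, ih _ rest (by simpa using h)]
      simp [List.zipWith]

-- the initial answer list is a list of zeros
theorem answer_replicate (n : Nat) :
    (PySem.List.pyRange 0 (n : Int) 1).map (fun _ => (0 : Int)) = List.replicate n 0 := by
  rw [PySem.List.pyRange_zero_natCast, List.map_map]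
  have : ((fun _ => (0 : Int)) ∘ (fun k : Nat => (k : Int))) = fun _ => (0 : Int) := rfl
  rw [this, List.map_const', List.length_range]

theorem zip_repl (g : String → Int) (xs : List String) :
    List.zipWith (fun a x => a + g x) (List.replicate xs.length 0) xs = xs.map g := by
  induction xs with
  | nil => simp
  | cons x xs ih => simp [List.replicate_succ, ih]

-- outer_fold specialised to the whole answer list of zeros
theorem outer_fold0 (c : String → Prop) [DecidablePred c] (S : String → List String)
    (xs : List String) :
    (PySem.List.enumerate xs (0 : Int)).foldl
      (fun ans p =>
        (S p.2).foldl
          (fun ans y =>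
            if c y then PySem.List.pySetD ans p.1 (PySem.List.pyGetD ans p.1 0 + 1) else ans)
          ans)
      (List.replicate xs.length 0)
      = xs.map (fun x => (((S x).countP (fun y => decide (c y)) : Nat) : Int)) := by
  rw [← zip_repl (fun x => (((S x).countP (fun y => decide (c y)) : Nat) : Int)) xs]
  have h := outer_fold c S xs ([] : List Int) (List.replicate xs.length 0) (by simp)
  simpa using h

-- assembled per-id value: A's count over the grouped targets equals B's credit counter
theorem per_id (U : List String) (x : String) :
    (((U.foldl (fun d r => d.modify (srcOf r) PySem.Set.empty (fun t => PySem.Set.add t (tgtOf r))) PySem.Dict.empty).getD x PySem.Set.empty).countP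
        (fun y => decide ((PySem.Dict.counter (U.map tgtOf)).getD y 0 ≥ 2)))
      = (((PySem.Set.ofList (U.map (fun r => (srcOf r, tgtOf r)))).filter
            (fun p => decide ((PySem.Dict.counter (U.map tgtOf)).getD p.2 0 ≥ 2))).map (·.1)).count x := by
  have hgrp := group_inv U PySem.Dict.empty PySem.Set.empty (fun x => by simp [PySem.Set.empty]) x
  have hP : U.foldl (fun s r => PySem.Set.add s (srcOf r, tgtOf r)) PySem.Set.empty
      = PySem.Set.ofList (U.map (fun r => (srcOf r, tgtOf r))) := by
    rw [PySem.Set.ofList_eq_foldl, List.foldl_map]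
    rfl
  rw [hP] at hgrp
  rw [hgrp, List.countP_map, List.countP_filter, List.count_eq_countP, List.countP_map, List.countP_filter]
  apply List.countP_congr
  intro p _
  simp [Bool.and_comm]

-- ===== VERDICT (by name: the statement is the Claim_ definition above) =====
theorem solution_spec : Claim_equal_solution := by
  intro id_list report k _ _
  unfold Spec_solution solution solution_alt
  dsimp only
  rw [PySem.List.foldl_prod_mk
        (fun (d : PySem.Dict String Int) r => d.modify (tgtOf r) 0 (· + 1))
        (fun (d : PySem.Dict String (PySem.Set String)) r => d.modify (srcOf r) PySem.Set.empty (fun s => PySem.Set.add s (tgtOf r)))]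
  have hcnt : (PySem.Set.ofList report).foldl (fun d r => d.modify (tgtOf r) 0 (· + 1)) PySem.Dict.empty
      = PySem.Dict.counter ((PySem.Set.ofList report).map tgtOf) := by
    rw [PySem.Dict.counter_eq_foldl, List.foldl_map]
  rw [hcnt, answer_replicate]
  rw [outer_fold0 (fun y => (PySem.Dict.counter ((PySem.Set.ofList report).map tgtOf)).getD y 0 ≥ 2)
        (fun x => ((PySem.Set.ofList report).foldl (fun d r => d.modify (srcOf r) PySem.Set.empty (fun t => PySem.Set.add t (tgtOf r))) PySem.Dict.empty).getD x PySem.Set.empty)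
        id_list]
  apply List.map_congr_left
  intro x _
  rw [PySem.Dict.getD_counter]
  exact_mod_cast per_id (PySem.Set.ofList report) x
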